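-- pv_equiv track=rewrite | github.com/sunggeunkim/datastructure | codefight/findSubstrings.py | findSubstrings
-- ===== SOURCE A (Python) =====
-- def findSubstrings(words, parts):
--     parts = set(parts)
--     results = list(words)
--     for i, word in enumerate(words):
--         longest = 0
--         for k in range(len(word)):
--             for l in range(5, 0, -1):
--                 if word[k:k+l] in parts and len(word[k:k+l]) > longest:
--                     longest = len(word[k:k+l])
--                     results[i] = word[:k] + "[" + word[k:k+l] + "]" + word[k+l:]
--     return results
-- ===== SOURCE B (Python) =====
-- def findSubstrings(words, parts):
--     ps = set(parts)
--
--     def wrap(word):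
--         n = len(word)
--         # longest-first search with early exit: the first (L, k) found
--         # (L from 5 down, k left to right) is the leftmost-longest match
--         for L in range(5, 0, -1):
--             for k in range(n - L + 1):
--                 if word[k:k+L] in ps:
--                     return word[:k] + "[" + word[k:k+L] + "]" + word[k+L:]
--         return word
--
--     return [wrap(w) for w in words]
-- ===== Notes on version B (the rewrite author's own statement) =====
-- stated objective: faster
-- what changed: Replaces A's full scan of every position with max-tracking and repeated overwriting of results[i] by a longest-first search (L from 5 down, k left to right) that returns at the first hit, wrapping the leftmost-longest match directly.
import Mathlib
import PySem

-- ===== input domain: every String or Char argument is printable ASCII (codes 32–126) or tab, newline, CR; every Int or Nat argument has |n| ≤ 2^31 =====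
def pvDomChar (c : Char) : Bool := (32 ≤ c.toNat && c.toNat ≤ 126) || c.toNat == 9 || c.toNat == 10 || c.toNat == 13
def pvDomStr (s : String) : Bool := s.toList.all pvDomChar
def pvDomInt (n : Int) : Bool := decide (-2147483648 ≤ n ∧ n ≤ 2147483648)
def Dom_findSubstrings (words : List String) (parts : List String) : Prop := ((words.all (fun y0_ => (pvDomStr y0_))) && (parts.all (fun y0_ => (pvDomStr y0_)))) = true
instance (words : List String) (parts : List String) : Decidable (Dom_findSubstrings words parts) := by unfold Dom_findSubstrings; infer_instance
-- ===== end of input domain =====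

-- B replaces A's exhaustive position scan with max-tracking by a longest-first
-- search (match length 5 down to 1, start index left to right) that stops at the
-- first hit; same return value, measured faster (early exit; result built once).

-- ===== PORT A =====
-- Literal port of A: results[i] depends only on words[i], so 'results = list(words)'
-- plus 'results[i] = …' is the per-element map below; the loops are folds over
-- range(len(word)) and range(5, 0, -1) carrying the (longest, results[i]) state.
def findSubstrings (words : List String) (parts : List String) : List String :=
  let ps := PySem.Set.ofList parts
  words.map (fun word =>
    let w := word.toList
    String.ofList
      (((List.range w.length).foldl
          (fun (st : Nat × List Char) (k : Nat) =>
            [5, 4, 3, 2, 1].foldl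
              (fun (st : Nat × List Char) (l : Nat) =>
                let s := PySem.List.slice w (some (k : Int)) (some ((k : Int) + (l : Int)))
                if ps.contains (String.ofList s) ∧ s.length > st.1 then
                  (s.length,
                   PySem.List.slice w none (some (k : Int)) ++ '[' :: s ++ ']' ::
                     PySem.List.slice w (some ((k : Int) + (l : Int))) none)
                else st)
              st)
          (0, w)).2))

-- ===== PORT B =====
-- Port of B (Source B): the early-returning double loop 'for L in range(5,0,-1): for k
-- in range(n-L+1): if hit: return wrapped' is findSome? over L of find? over k.
def findSubstrings_alt (words : List String) (parts : List String) : List String :=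
  let ps := PySem.Set.ofList parts
  words.map (fun word =>
    let w := word.toList
    match [5, 4, 3, 2, 1].findSome? (fun (L : Nat) =>
        ((List.range (w.length + 1 - L)).find? (fun (k : Nat) =>
            ps.contains (String.ofList
              (PySem.List.slice w (some (k : Int)) (some ((k : Int) + (L : Int))))))).map
          (fun k => (L, k))) with
    | some (L, k) =>
        String.ofList
          (PySem.List.slice w none (some (k : Int)) ++ '[' ::
            PySem.List.slice w (some (k : Int)) (some ((k : Int) + (L : Int))) ++ ']' ::
            PySem.List.slice w (some ((k : Int) + (L : Int))) none)
    | none => word)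

-- ===== PRECONDITION & SPEC =====
def Spec_findSubstrings (words : List String) (parts : List String) (out : List String) : Prop := out = findSubstrings_alt words parts
instance (words : List String) (parts : List String) (out : List String) : Decidable (Spec_findSubstrings words parts out) := by unfold Spec_findSubstrings; infer_instance

-- ===== CLAIM (what is proved, stated in full; the proofs are below) =====
def Claim_equal_findSubstrings : Prop := ∀ (words : List String) (parts : List String), Dom_findSubstrings words parts → Spec_findSubstrings words parts (findSubstrings words parts)

-- ===== LEMMAS AND PROOFS =====

def pvSlc (w : List Char) (k l : Nat) : List Char := (w.drop k).take l

lemma pvSlc_min (w : List Char) (k l : Nat) : pvSlc w k l = pvSlc w k (min l (w.length - k)) := by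
  unfold pvSlc
  by_cases h : l ≤ w.length - k
  · rw [Nat.min_eq_left h]
  · rw [Nat.min_eq_right (by omega),
        List.take_of_length_le (by simp only [List.length_drop]; omega),
        List.take_of_length_le (by simp)]

lemma pvDrop_min (w : List Char) (k l : Nat) : w.drop (k + l) = w.drop (k + min l (w.length - k)) := by
  by_cases h : l ≤ w.length - k
  · rw [Nat.min_eq_left h]
  · rw [Nat.min_eq_right (by omega), List.drop_eq_nil_of_le (by omega),
        List.drop_eq_nil_of_le (by omega)]

lemma pvSlc_length (w : List Char) (k l : Nat) : (pvSlc w k l).length = min l (w.length - k) := by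
  simp [pvSlc]

lemma pvFold_first (hit : Nat → Bool) (len : Nat → Nat) (wr : Nat → List Char) :
    ∀ (ls : List Nat) (st : Nat × List Char),
      List.Pairwise (fun a b => len b ≤ len a) ls →
      ls.foldl (fun st l => if hit l ∧ len l > st.1 then (len l, wr l) else st) st =
        (match ls.find? hit with
         | none => st
         | some l0 => if len l0 > st.1 then (len l0, wr l0) else st) := by
  intro ls
  induction ls with
  | nil => intro st _; rfl
  | cons x xs ih =>
    intro st hp
    rw [List.pairwise_cons] at hp
    obtain ⟨hx, hxs⟩ := hp
    by_cases hhx : hit x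
    · simp only [List.foldl_cons, List.find?_cons_of_pos hhx]
      by_cases hlen : len x > st.1
      · rw [if_pos ⟨hhx, hlen⟩, ih _ hxs]
        rcases hfind : xs.find? hit with _ | l1
        · simp [hlen]
        · have hl1 : len l1 ≤ len x := hx l1 (List.mem_of_find?_eq_some hfind)
          simp [hlen, Nat.not_lt.mpr hl1]
      · rw [if_neg (by tauto), ih _ hxs]
        rcases hfind : xs.find? hit with _ | l1
        · simp [hlen]
        · have hl1 : len l1 ≤ len x := hx l1 (List.mem_of_find?_eq_some hfind)
          have h2 : ¬ st.1 < len l1 := by omega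
          simp [hlen, h2]
    · have hfx : hit x = false := by simpa using hhx
      simp only [List.foldl_cons, List.find?_cons_of_neg hhx]
      rw [if_neg (by simp [hfx]), ih _ hxs]

lemma find?_range_eq_some_iff (p : Nat → Bool) (j : Nat) : ∀ (k : Nat),
    (List.range j).find? p = some k ↔ k < j ∧ p k = true ∧ ∀ i < k, p i = false := by
  induction j with
  | zero => intro k; simp
  | succ j ih =>
    intro k
    rw [List.range_succ, List.find?_append]
    constructor
    · intro h
      rcases hfind : (List.range j).find? p with _ | k'
      · rw [hfind] at h
        simp only [Option.none_or] at h
        by_cases hpj : p j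
        · rw [List.find?_cons_of_pos hpj] at h
          simp only [Option.some.injEq] at h
          subst h
          refine ⟨by omega, hpj, fun i hi => ?_⟩
          have := (List.find?_eq_none.mp hfind) i (by simp; omega)
          simpa using this
        · rw [List.find?_cons_of_neg (by simpa using hpj)] at h
          simp at h
      · rw [hfind] at h
        simp only [Option.some_or, Option.some.injEq] at h
        subst h
        have := (ih k').mp hfind
        exact ⟨by omega, this.2.1, this.2.2⟩
    · rintro ⟨hk, hp, hfirst⟩
      rcases Nat.lt_or_ge k j with h | h
      · rw [(ih k).mpr ⟨h, hp, hfirst⟩]; rfl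
      · have hkj : k = j := by omega
        subst hkj
        have hnone : (List.range k).find? p = none := by
          rw [List.find?_eq_none]; intro i hi; simp at hi; simp [hfirst i hi]
        rw [hnone, Option.none_or, List.find?_cons_of_pos hp]

lemma find?_ge_of_sorted (p : Nat → Bool) :
    ∀ ls : List Nat, List.Pairwise (· > ·) ls → ∀ L ∈ ls, p L = true →
      ∃ l0, ls.find? p = some l0 ∧ L ≤ l0 := by
  intro ls
  induction ls with
  | nil => simp
  | cons x xs ih =>
    intro hp L hL hpL
    rw [List.pairwise_cons] at hp
    by_cases hx : p x
    · refine ⟨x, List.find?_cons_of_pos hx, ?_⟩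
      rcases List.mem_cons.mp hL with h | h
      · omega
      · exact le_of_lt (hp.1 L h)
    · have hLxs : L ∈ xs := by
        rcases List.mem_cons.mp hL with h | h
        · subst h; rw [hpL] at hx; simp at hx
        · exact h
      obtain ⟨l0, h1, h2⟩ := ih hp.2 L hLxs hpL
      exact ⟨l0, by rw [List.find?_cons_of_neg (by simpa using hx), h1], h2⟩

def pvHit (ps : PySem.Set String) (w : List Char) (k l : Nat) : Bool :=
  ps.contains (String.ofList (pvSlc w k l))
def pvWrap (w : List Char) (k m : Nat) : List Char :=
  w.take k ++ '[' :: pvSlc w k m ++ ']' :: w.drop (k + m)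
def pvM (ps : PySem.Set String) (w : List Char) (k : Nat) : Nat :=
  match [5, 4, 3, 2, 1].find? (pvHit ps w k) with
  | some l => min l (w.length - k)
  | none => 0
def pvBest (ps : PySem.Set String) (w : List Char) (j : Nat) : Nat :=
  (List.range j).foldl (fun a k => max a (pvM ps w k)) 0
def pvArg (ps : PySem.Set String) (w : List Char) (j : Nat) : Nat :=
  (((List.range j).find? (fun k => pvM ps w k == pvBest ps w j))).getD 0

lemma pvM_le (ps : PySem.Set String) (w : List Char) (k : Nat) :
    pvM ps w k ≤ 5 ∧ pvM ps w k ≤ w.length - k := by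
  unfold pvM
  rcases hf : [5, 4, 3, 2, 1].find? (pvHit ps w k) with _ | l
  · simp
  · have hl : l ∈ [5, 4, 3, 2, 1] := List.mem_of_find?_eq_some hf
    simp only []
    constructor
    · have : l ≤ 5 := by fin_cases hl <;> omega
      omega
    · omega

lemma pvHit_min (ps : PySem.Set String) (w : List Char) (k l : Nat) :
    pvHit ps w k (min l (w.length - k)) = pvHit ps w k l := by
  unfold pvHit; rw [← pvSlc_min]

lemma pvM_attain (ps : PySem.Set String) (w : List Char) (k : Nat) (h : 0 < pvM ps w k) :
    pvHit ps w k (pvM ps w k) = true := by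
  unfold pvM at *
  rcases hf : [5, 4, 3, 2, 1].find? (pvHit ps w k) with _ | l
  · rw [hf] at h; simp at h
  · simp only []
    rw [pvHit_min]
    exact List.find?_some hf

lemma pvM_dom (ps : PySem.Set String) (w : List Char) (k L : Nat)
    (h1 : 1 ≤ L) (h5 : L ≤ 5) (hn : k + L ≤ w.length) (hh : pvHit ps w k L = true) :
    L ≤ pvM ps w k := by
  have hmem : L ∈ [5, 4, 3, 2, 1] := by interval_cases L <;> simp
  obtain ⟨l0, hf, hle⟩ := find?_ge_of_sorted (pvHit ps w k) [5, 4, 3, 2, 1]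
    (by simp) L hmem hh
  unfold pvM
  rw [hf]
  simp only []
  omega

lemma pvBest_succ (ps : PySem.Set String) (w : List Char) (j : Nat) :
    pvBest ps w (j + 1) = max (pvBest ps w j) (pvM ps w j) := by
  unfold pvBest
  rw [List.range_succ, List.foldl_append]
  rfl

lemma pvBest_le (ps : PySem.Set String) (w : List Char) (j k : Nat) (h : k < j) :
    pvM ps w k ≤ pvBest ps w j := by
  induction j with
  | zero => omega
  | succ j ih =>
    rw [pvBest_succ]
    rcases Nat.lt_or_ge k j with h' | h'
    · exact le_trans (ih h') (le_max_left _ _)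
    · have : k = j := by omega
      subst this
      exact le_max_right _ _

lemma pvBest_le_five (ps : PySem.Set String) (w : List Char) (j : Nat) :
    pvBest ps w j ≤ 5 := by
  induction j with
  | zero => simp [pvBest]
  | succ j ih =>
    rw [pvBest_succ]
    exact max_le ih (pvM_le ps w j).1

lemma pvBest_attained (ps : PySem.Set String) (w : List Char) (j : Nat)
    (h : 0 < pvBest ps w j) : ∃ k < j, pvM ps w k = pvBest ps w j := by
  induction j with
  | zero => simp [pvBest] at h
  | succ j ih =>
    rw [pvBest_succ] at h ⊢
    rcases Nat.lt_or_ge (pvBest ps w j) (pvM ps w j) with h' | h'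
    · exact ⟨j, by omega, by omega⟩
    · rw [Nat.max_eq_left h'] at h ⊢
      obtain ⟨k, hk, hm⟩ := ih h
      exact ⟨k, by omega, hm⟩

lemma pvArg_spec (ps : PySem.Set String) (w : List Char) (j : Nat) (h : 0 < pvBest ps w j) :
    (List.range j).find? (fun k => pvM ps w k == pvBest ps w j) = some (pvArg ps w j) := by
  obtain ⟨k, hk, hm⟩ := pvBest_attained ps w j h
  have hsome : (((List.range j).find? (fun k => pvM ps w k == pvBest ps w j))).isSome := by
    rw [List.find?_isSome]
    exact ⟨k, by simp [hk], by simp [hm]⟩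
  rcases hf : (List.range j).find? (fun k => pvM ps w k == pvBest ps w j) with _ | a
  · rw [hf] at hsome; simp at hsome
  · unfold pvArg; rw [hf]; rfl

lemma pvM_pos_findsome (ps : PySem.Set String) (w : List Char) (j : Nat) (h : 0 < pvM ps w j) :
    ∃ l0, [5, 4, 3, 2, 1].find? (pvHit ps w j) = some l0 ∧ pvM ps w j = min l0 (w.length - j) := by
  unfold pvM at *
  rcases hf : [5, 4, 3, 2, 1].find? (pvHit ps w j) with _ | l0
  · rw [hf] at h; simp at h
  · exact ⟨l0, rfl, rfl⟩

lemma pvOuter (ps : PySem.Set String) (w : List Char) (j : Nat) :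
    (List.range j).foldl
      (fun (st : Nat × List Char) k =>
        [5, 4, 3, 2, 1].foldl
          (fun (st : Nat × List Char) l =>
            if pvHit ps w k l ∧ (pvSlc w k l).length > st.1 then
              ((pvSlc w k l).length, w.take k ++ '[' :: pvSlc w k l ++ ']' :: w.drop (k + l))
            else st)
          st)
      (0, w) =
    (pvBest ps w j,
     if pvBest ps w j = 0 then w else pvWrap w (pvArg ps w j) (pvBest ps w j)) := by
  induction j with
  | zero => simp [pvBest]
  | succ j ih =>
    rw [List.range_succ, List.foldl_append, ih, List.foldl_cons, List.foldl_nil]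
    have hpair : List.Pairwise (fun a b => (pvSlc w j b).length ≤ (pvSlc w j a).length)
        [5, 4, 3, 2, 1] := by
      simp [pvSlc_length]
    rw [pvFold_first (pvHit ps w j) (fun l => (pvSlc w j l).length)
          (fun l => w.take j ++ '[' :: pvSlc w j l ++ ']' :: w.drop (j + l))
          [5, 4, 3, 2, 1] _ hpair]
    rcases Nat.lt_or_ge (pvBest ps w j) (pvM ps w j) with hcase | hcase
    · -- strict improvement at j
      obtain ⟨l0, hf, hmin⟩ := pvM_pos_findsome ps w j (by omega)
      rw [hf]
      simp only [pvSlc_length]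
      rw [if_pos (by omega)]
      have hB1 : pvBest ps w (j + 1) = pvM ps w j := by
        rw [pvBest_succ]; omega
      have hArg : pvArg ps w (j + 1) = j := by
        have : (List.range (j + 1)).find? (fun k => pvM ps w k == pvBest ps w (j + 1)) = some j := by
          rw [find?_range_eq_some_iff]
          refine ⟨by omega, by simp [hB1], fun i hi => ?_⟩
          have h1 : pvM ps w i ≤ pvBest ps w j := pvBest_le ps w j i hi
          simp only [beq_eq_false_iff_ne, ne_eq, hB1]
          omega
        unfold pvArg; rw [this]; rfl
      have hwrap : (w.take j ++ '[' :: pvSlc w j l0 ++ ']' :: w.drop (j + l0)) =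
          pvWrap w j (pvM ps w j) := by
        unfold pvWrap
        rw [hmin, pvSlc_min w j l0, pvDrop_min w j l0]
      rw [hwrap, hB1, hArg, if_neg (by omega), hmin]
    · -- no improvement at j
      have hB1 : pvBest ps w (j + 1) = pvBest ps w j := by rw [pvBest_succ]; omega
      by_cases h0 : pvBest ps w j = 0
      · rcases hf : [5,4,3,2,1].find? (pvHit ps w j) with _ | l0
        · simp only [hB1, h0]; rfl
        · have hm : pvM ps w j = min l0 (w.length - j) := by unfold pvM; rw [hf]
          simp only [pvSlc_length, hB1, h0]
          rw [if_neg (by omega)]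
          simp
      · have hArg : pvArg ps w (j + 1) = pvArg ps w j := by
          unfold pvArg
          rw [List.range_succ, List.find?_append, hB1,
              pvArg_spec ps w j (by omega)]
          rfl
        rcases hf : [5,4,3,2,1].find? (pvHit ps w j) with _ | l0
        · simp only [hB1, hArg]
        · have hm : pvM ps w j = min l0 (w.length - j) := by unfold pvM; rw [hf]
          simp only [pvSlc_length, hB1, hArg]
          rw [if_neg (by omega)]

lemma pvAlt_none (ps : PySem.Set String) (w : List Char) (L : Nat)
    (h1 : 1 ≤ L) (h5 : L ≤ 5) (hM : pvBest ps w w.length < L) :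
    (List.range (w.length + 1 - L)).find? (fun k => pvHit ps w k L) = none := by
  rw [List.find?_eq_none]
  intro k hk
  simp only [List.mem_range] at hk
  by_contra hcon
  have hh : pvHit ps w k L = true := by simpa using hcon
  have hdom := pvM_dom ps w k L h1 h5 (by omega) hh
  have hle := pvBest_le ps w w.length k (by omega)
  omega

lemma pvAlt_hit (ps : PySem.Set String) (w : List Char) (h : 0 < pvBest ps w w.length) :
    (List.range (w.length + 1 - pvBest ps w w.length)).find?
      (fun k => pvHit ps w k (pvBest ps w w.length)) = some (pvArg ps w w.length) := by
  have hspec := (find?_range_eq_some_iff _ _ _).mp (pvArg_spec ps w w.length h)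
  obtain ⟨hlt, hpred, hfirst⟩ := hspec
  have hM : pvM ps w (pvArg ps w w.length) = pvBest ps w w.length := by simpa using hpred
  have hMle := pvM_le ps w (pvArg ps w w.length)
  rw [find?_range_eq_some_iff]
  refine ⟨by omega, ?_, fun i hi => ?_⟩
  · rw [← hM]; exact pvM_attain ps w _ (by omega)
  · by_contra hcon
    have hh : pvHit ps w i (pvBest ps w w.length) = true := by simpa using hcon
    have hdom := pvM_dom ps w i (pvBest ps w w.length) (by omega)
      (pvBest_le_five ps w w.length) (by omega) hh
    have hle := pvBest_le ps w w.length i (by omega)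
    have heq : pvM ps w i = pvBest ps w w.length := by omega
    have := hfirst i hi
    simp [heq] at this

lemma pvFindSome (ps : PySem.Set String) (w : List Char) :
    ([5, 4, 3, 2, 1].findSome? (fun L =>
        ((List.range (w.length + 1 - L)).find? (fun k => pvHit ps w k L)).map
          (fun k => (L, k)))) =
      (if pvBest ps w w.length = 0 then none
       else some (pvBest ps w w.length, pvArg ps w w.length)) := by
  have h5 := pvBest_le_five ps w w.length
  simp only [List.findSome?]
  by_cases e0 : pvBest ps w w.length = 0
  · rw [pvAlt_none ps w 5 (by omega) (by omega) (by omega),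
        pvAlt_none ps w 4 (by omega) (by omega) (by omega),
        pvAlt_none ps w 3 (by omega) (by omega) (by omega),
        pvAlt_none ps w 2 (by omega) (by omega) (by omega),
        pvAlt_none ps w 1 (by omega) (by omega) (by omega)]
    simp [e0]
  by_cases e1 : pvBest ps w w.length = 1
  · have hh := pvAlt_hit ps w (by omega)
    rw [e1] at hh
    rw [pvAlt_none ps w 5 (by omega) (by omega) (by omega),
        pvAlt_none ps w 4 (by omega) (by omega) (by omega),
        pvAlt_none ps w 3 (by omega) (by omega) (by omega),
        pvAlt_none ps w 2 (by omega) (by omega) (by omega), hh]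
    simp [e1]
  by_cases e2 : pvBest ps w w.length = 2
  · have hh := pvAlt_hit ps w (by omega)
    rw [e2] at hh
    rw [pvAlt_none ps w 5 (by omega) (by omega) (by omega),
        pvAlt_none ps w 4 (by omega) (by omega) (by omega),
        pvAlt_none ps w 3 (by omega) (by omega) (by omega), hh]
    simp [e2]
  by_cases e3 : pvBest ps w w.length = 3
  · have hh := pvAlt_hit ps w (by omega)
    rw [e3] at hh
    rw [pvAlt_none ps w 5 (by omega) (by omega) (by omega),
        pvAlt_none ps w 4 (by omega) (by omega) (by omega), hh]
    simp [e3]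
  by_cases e4 : pvBest ps w w.length = 4
  · have hh := pvAlt_hit ps w (by omega)
    rw [e4] at hh
    rw [pvAlt_none ps w 5 (by omega) (by omega) (by omega), hh]
    simp [e4]
  · have e5 : pvBest ps w w.length = 5 := by omega
    have hh := pvAlt_hit ps w (by omega)
    rw [e5] at hh
    rw [hh]
    simp [e5]

lemma pvWord_eq (ps : PySem.Set String) (word : String) :
    String.ofList
      (((List.range word.toList.length).foldl
          (fun (st : Nat × List Char) (k : Nat) =>
            [5, 4, 3, 2, 1].foldl
              (fun (st : Nat × List Char) (l : Nat) =>
                let s := PySem.List.slice word.toList (some (k : Int)) (some ((k : Int) + (l : Int)))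
                if ps.contains (String.ofList s) ∧ s.length > st.1 then
                  (s.length,
                   PySem.List.slice word.toList none (some (k : Int)) ++ '[' :: s ++ ']' ::
                     PySem.List.slice word.toList (some ((k : Int) + (l : Int))) none)
                else st)
              st)
          (0, word.toList)).2) =
    (match [5, 4, 3, 2, 1].findSome? (fun (L : Nat) =>
        ((List.range (word.toList.length + 1 - L)).find? (fun (k : Nat) =>
            ps.contains (String.ofList
              (PySem.List.slice word.toList (some (k : Int)) (some ((k : Int) + (L : Int))))))).map
          (fun k => (L, k))) with
    | some (L, k) =>
        String.ofList
          (PySem.List.slice word.toList none (some (k : Int)) ++ '[' ::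
            PySem.List.slice word.toList (some (k : Int)) (some ((k : Int) + (L : Int))) ++ ']' ::
            PySem.List.slice word.toList (some ((k : Int) + (L : Int))) none)
    | none => word) := by
  simp only [PySem.List.slice_natCast_add]
  simp only [← Nat.cast_add]
  simp only [PySem.List.slice_to_natCast, PySem.List.slice_from_natCast]
  have hO := pvOuter ps word.toList word.toList.length
  simp only [pvHit, pvSlc] at hO
  rw [hO]
  have hF := pvFindSome ps word.toList
  simp only [pvHit, pvSlc] at hF
  rw [hF]
  by_cases h0 : pvBest ps word.toList word.toList.length = 0
  · rw [if_pos h0, if_pos h0]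
    exact String.ofList_toList
  · rw [if_neg h0, if_neg h0]
    simp only [pvWrap, pvSlc]

-- ===== VERDICT (by name: the statement is the Claim_ definition above) =====
theorem findSubstrings_spec : Claim_equal_findSubstrings := by
  intro words parts _
  unfold Spec_findSubstrings findSubstrings findSubstrings_alt
  exact List.map_congr_left (fun word _ => pvWord_eq (PySem.Set.ofList parts) word)
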